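-- pv_equiv track=rewrite | github.com/amandavical/estrutura-de-dados | lista1/recursividade.py | removeImpares
-- ===== SOURCE A (Python) =====
-- def removeImpares(n):
--     if n < 10:
--         if n % 2 == 1:
--             return 0
--         return n
--     menor_resto = removeImpares(n // 10)
--     ultimo_digito = n % 10
--
--     if ultimo_digito % 2 == 1:
--        return menor_resto  # Ignora este dígito
--     else:
--       return menor_resto * 10 + ultimo_digito # Adiciona ao número reconstruído
-- ===== SOURCE B (Python) =====
-- def removeImpares(n):
--     if n < 10:
--         return 0 if n % 2 == 1 else n
--     result = 0
--     for ch in str(n):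
--         d = ord(ch) - 48
--         if d % 2 == 0:
--             result = result * 10 + d
--     return result
-- ===== Notes on version B (the rewrite author's own statement) =====
-- stated objective: idiomatic
-- what changed: Replaced the tail recursion over the quotient by the base with a single left-to-right loop over the digit characters of str(n), accumulating the even digits into the result; the single-digit base case is kept verbatim.
import Mathlib
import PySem

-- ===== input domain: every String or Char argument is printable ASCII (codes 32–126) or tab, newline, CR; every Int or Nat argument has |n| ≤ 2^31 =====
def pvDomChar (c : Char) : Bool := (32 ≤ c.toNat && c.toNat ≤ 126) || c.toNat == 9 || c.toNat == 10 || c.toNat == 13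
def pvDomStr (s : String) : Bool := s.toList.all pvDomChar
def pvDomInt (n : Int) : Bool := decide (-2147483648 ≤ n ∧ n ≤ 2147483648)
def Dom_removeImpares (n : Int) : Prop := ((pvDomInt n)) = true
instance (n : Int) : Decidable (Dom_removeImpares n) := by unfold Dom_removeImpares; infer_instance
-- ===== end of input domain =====

-- B replaces A's tail recursion over n // 10 with a single left-to-right loop over the
-- digit characters of str(n), accumulating even digits; same return value on every Int.


-- ===== PORT A =====
def removeImpares (n : Int) : Int :=
  if _h : n < 10 then
    if PySem.Int.mod n 2 == 1 then 0 else n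
  else
    let menor_resto := removeImpares (PySem.Int.floordiv n 10)
    let ultimo_digito := PySem.Int.mod n 10
    if PySem.Int.mod ultimo_digito 2 == 1 then menor_resto
    else menor_resto * 10 + ultimo_digito
termination_by n.toNat
decreasing_by
  rw [PySem.Int.floordiv_eq_ediv_of_pos (by omega)]
  omega

-- ===== PORT B =====
def removeImpares_alt (n : Int) : Int :=
  if n < 10 then
    if PySem.Int.mod n 2 == 1 then 0 else n
  else
    (PySem.Int.toStr n).toList.foldl
      (fun result ch =>
        let d : Int := (ch.toNat : Int) - 48
        if PySem.Int.mod d 2 == 0 then result * 10 + d else result)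
      0

-- ===== PRECONDITION & SPEC =====
def Spec_removeImpares (n : Int) (out : Int) : Prop := out = removeImpares_alt n
instance (n : Int) (out : Int) : Decidable (Spec_removeImpares n out) := by unfold Spec_removeImpares; infer_instance

-- ===== CLAIM (what is proved, stated in full; the proofs are below) =====
def Claim_equal_removeImpares : Prop := ∀ (n : Int), Dom_removeImpares n → Spec_removeImpares n (removeImpares n)

-- ===== LEMMAS AND PROOFS =====

-- the digit list of m, most-significant first (what Nat.toDigits 10 produces)
def pvDigits (m : Nat) : List Char :=
  if _h : m < 10 then [Nat.digitChar m]
  else pvDigits (m / 10) ++ [Nat.digitChar (m % 10)]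
decreasing_by exact Nat.div_lt_self (by omega) (by omega)

lemma pvDigits_core (fuel : Nat) : ∀ (m : Nat) (ds : List Char), m < fuel →
    Nat.toDigitsCore 10 fuel m ds = pvDigits m ++ ds := by
  induction fuel with
  | zero => intro m ds h; omega
  | succ f ih =>
    intro m ds h
    rw [Nat.toDigitsCore]
    by_cases h10 : m < 10
    · have : m / 10 = 0 := Nat.div_eq_of_lt h10
      simp [this, pvDigits, h10, Nat.mod_eq_of_lt h10]
    · have hne : ¬ m / 10 = 0 := by
        intro hc; exact h10 (by omega : m < 10)
      have hdiv : m / 10 < m := Nat.div_lt_self (by omega) (by omega)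
      simp only [hne, if_false]
      rw [ih (m / 10) _ (by omega)]
      rw [show pvDigits m = pvDigits (m / 10) ++ [Nat.digitChar (m % 10)] from by
            rw [pvDigits]; simp [h10]]
      simp

lemma toDigits_eq_pvDigits (m : Nat) : Nat.toDigits 10 m = pvDigits m := by
  rw [Nat.toDigits, pvDigits_core (m + 1) m [] (by omega)]
  simp

lemma digitChar_toNat (k : Nat) (h : k < 10) : ((Nat.digitChar k).toNat : Int) - 48 = k := by
  interval_cases k <;> decide

-- the loop body of B
lemma removeImpares_eq_fold (m : Nat) :
    removeImpares (m : Int) =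
      (pvDigits m).foldl
        (fun result ch =>
          let d : Int := (ch.toNat : Int) - 48
          if PySem.Int.mod d 2 == 0 then result * 10 + d else result)
        0 := by
  induction m using Nat.strong_induction_on with
  | _ m ih =>
    by_cases h : m < 10
    · have hm : (m : Int) < 10 := by exact_mod_cast h
      rw [removeImpares, dif_pos hm]
      rw [show pvDigits m = [Nat.digitChar m] from by rw [pvDigits]; simp [h]]
      simp only [List.foldl]
      rw [digitChar_toNat m h]
      simp only [beq_iff_eq,
        PySem.Int.mod_eq_emod_of_pos (a := (m : Int)) (show (0:Int) < 2 by omega)]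
      split_ifs <;> omega
    · have hm : ¬ (m : Int) < 10 := by omega
      rw [show pvDigits m = pvDigits (m / 10) ++ [Nat.digitChar (m % 10)] from by
            rw [pvDigits]; simp [h]]
      rw [List.foldl_append]
      rw [removeImpares, dif_neg hm]
      rw [show PySem.Int.floordiv (m : Int) 10 = ((m / 10 : Nat) : Int) from by
            exact_mod_cast PySem.Int.floordiv_natCast m 10,
          show PySem.Int.mod (m : Int) 10 = ((m % 10 : Nat) : Int) from by
            exact_mod_cast PySem.Int.mod_natCast m 10]
      rw [ih (m / 10) (Nat.div_lt_self (by omega) (by omega))]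
      simp only [List.foldl]
      rw [digitChar_toNat (m % 10) (Nat.mod_lt m (by omega))]
      simp only [beq_iff_eq,
        PySem.Int.mod_eq_emod_of_pos (a := ((m % 10 : Nat) : Int)) (show (0:Int) < 2 by omega)]
      split_ifs <;> omega

-- ===== VERDICT (by name: the statement is the Claim_ definition above) =====
theorem removeImpares_spec : Claim_equal_removeImpares := by
  intro n _
  unfold Spec_removeImpares removeImpares_alt
  by_cases h : n < 10
  · rw [removeImpares]
    simp [h]
  · simp only [h, if_false]
    have hn : 0 ≤ n := by omega
    have htc : (PySem.Int.toStr n).toList = Nat.toDigits 10 n.toNat := by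
      rw [PySem.Int.toList_toStr, PySem.Int.toChars]
      simp [show ¬ n < 0 by omega]
    rw [htc, toDigits_eq_pvDigits]
    have := removeImpares_eq_fold n.toNat
    rw [Int.toNat_of_nonneg hn] at this
    exact this
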